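-- pv_equiv track=rewrite | github.com/sina-kz/Splitwise | Utils/Algorithms/split_algorithm.py | minCashFlow
-- ===== SOURCE A (Python) =====
-- def getMin(arr, N):
--     minInd = 0
--     for i in range(1, N):
--         if (arr[i] < arr[minInd]):
--             minInd = i
--     return minInd
--
-- def getMax(arr, N):
--     maxInd = 0
--     for i in range(1, N):
--         if (arr[i] > arr[maxInd]):
--             maxInd = i
--     return maxInd
--
-- def minOf2(x, y):
--     return x if x < y else y
--
-- def minCashFlowRec(amount, N, final_graph):
--     mxCredit = getMax(amount, N)
--     mxDebit = getMin(amount, N)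
--
--     if (amount[mxCredit] == 0 and amount[mxDebit] == 0):
--         return 0
--
--     min = minOf2(-amount[mxDebit], amount[mxCredit])
--     amount[mxCredit] -= min
--     amount[mxDebit] += min
--
--     final_graph[mxDebit][mxCredit] = min
--
--     minCashFlowRec(amount, N, final_graph)
--
-- def minCashFlow(graph):
--     N = len(graph)
--     final_graph = [[0 for i in range(N)] for j in range(N)]
--
--     amount = [0 for i in range(N)]
--
--     for p in range(N):
--         for i in range(N):
--             amount[p] += (graph[i][p] - graph[p][i])
--
--     minCashFlowRec(amount, N, final_graph)
--     return final_graph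
-- ===== SOURCE B (Python) =====
-- def minCashFlow(graph):
--     N = len(graph)
--     amount = [sum(row[p] for row in graph) - sum(graph[p][:N]) for p in range(N)]
--     transfers = []
--     while True:
--         credit = 0
--         debit = 0
--         for i in range(1, N):
--             if amount[i] > amount[credit]:
--                 credit = i
--             if amount[i] < amount[debit]:
--                 debit = i
--         if amount[credit] == 0 and amount[debit] == 0:
--             break
--         m = min(-amount[debit], amount[credit])
--         amount[credit] -= m
--         amount[debit] += m
--         transfers.append((debit, credit, m))
--     final_graph = [[0] * N for _ in range(N)]
--     for d, c, m in transfers: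
--         final_graph[d][c] = m
--     return final_graph
-- ===== Notes on version B (the rewrite author's own statement) =====
-- stated objective: alternative
-- what changed: The recursive settle function is replaced by an iterative loop with one combined max/min scan per round that collects the (debit, credit, amount) transfers and writes the result matrix once at the end, and the net amounts are computed directly as column-sum minus row-sum instead of element-wise accumulation.
import Mathlib
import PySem

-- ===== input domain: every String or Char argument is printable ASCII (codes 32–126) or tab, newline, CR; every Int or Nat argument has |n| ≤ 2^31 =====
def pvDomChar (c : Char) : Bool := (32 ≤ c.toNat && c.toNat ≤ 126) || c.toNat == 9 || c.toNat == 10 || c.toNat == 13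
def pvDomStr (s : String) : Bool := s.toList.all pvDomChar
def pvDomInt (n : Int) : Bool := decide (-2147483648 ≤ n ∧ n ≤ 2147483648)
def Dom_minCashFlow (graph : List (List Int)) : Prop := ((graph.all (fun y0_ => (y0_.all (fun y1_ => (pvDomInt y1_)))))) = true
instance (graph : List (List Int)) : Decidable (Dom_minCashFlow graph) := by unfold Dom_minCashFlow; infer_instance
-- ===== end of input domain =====

-- B replaces the recursive settle function by an iterative loop with ONE combined
-- min/max scan per round that collects the transfers and builds the matrix once at
-- the end, and computes the net amounts directly as column-sum minus row-sum
-- (objective: alternative decomposition; same asymptotic cost).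
-- Both Lean loops carry a fuel argument (N+1) only to be total; on inputs
-- satisfying Pre_ the Python loops make at most N rounds, so the fuel never runs out.

-- ===== PORT A =====
def pvGetMin (arr : List Int) (N : Int) : Int :=
  (PySem.List.pyRange 1 N 1).foldl (fun minInd i =>
    if PySem.List.pyGetD arr i 0 < PySem.List.pyGetD arr minInd 0 then i else minInd) 0

def pvGetMax (arr : List Int) (N : Int) : Int :=
  (PySem.List.pyRange 1 N 1).foldl (fun maxInd i =>
    if PySem.List.pyGetD arr i 0 > PySem.List.pyGetD arr maxInd 0 then i else maxInd) 0

def pvMinOf2 (x y : Int) : Int := if x < y then x else y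

def pvRecA : Nat → List Int → Int → List (List Int) → List (List Int)
  | 0, _, _, fg => fg
  | fuel+1, amount, N, fg =>
    let mxCredit := pvGetMax amount N
    let mxDebit := pvGetMin amount N
    if PySem.List.pyGetD amount mxCredit 0 = 0 ∧ PySem.List.pyGetD amount mxDebit 0 = 0 then fg
    else
      let m := pvMinOf2 (-(PySem.List.pyGetD amount mxDebit 0)) (PySem.List.pyGetD amount mxCredit 0)
      let amount1 := PySem.List.pySetD amount mxCredit (PySem.List.pyGetD amount mxCredit 0 - m)
      let amount2 := PySem.List.pySetD amount1 mxDebit (PySem.List.pyGetD amount1 mxDebit 0 + m)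
      let fg1 := PySem.List.pySetD fg mxDebit
        (PySem.List.pySetD (PySem.List.pyGetD fg mxDebit []) mxCredit m)
      pvRecA fuel amount2 N fg1

def minCashFlow (graph : List (List Int)) : List (List Int) :=
  let N : Int := graph.length
  let final_graph := (PySem.List.pyRange 0 N 1).map (fun _ =>
    (PySem.List.pyRange 0 N 1).map (fun _ => (0 : Int)))
  let amount0 := (PySem.List.pyRange 0 N 1).map (fun _ => (0 : Int))
  let amount := (PySem.List.pyRange 0 N 1).foldl (fun amt p =>
    (PySem.List.pyRange 0 N 1).foldl (fun amt i =>
      PySem.List.pySetD amt p (PySem.List.pyGetD amt p 0 +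
        (PySem.List.pyGetD (PySem.List.pyGetD graph i []) p 0 -
         PySem.List.pyGetD (PySem.List.pyGetD graph p []) i 0))) amt) amount0
  pvRecA (N.toNat + 1) amount N final_graph

-- ===== PORT B =====
def pvScanB (amount : List Int) (N : Int) : Int × Int :=
  (PySem.List.pyRange 1 N 1).foldl (fun cd i =>
    let c := if PySem.List.pyGetD amount i 0 > PySem.List.pyGetD amount cd.1 0 then i else cd.1
    let d := if PySem.List.pyGetD amount i 0 < PySem.List.pyGetD amount cd.2 0 then i else cd.2
    (c, d)) ((0 : Int), (0 : Int))

def pvLoopB : Nat → List Int → Int → List (Int × Int × Int)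
  | 0, _, _ => []
  | fuel+1, amount, N =>
    let cd := pvScanB amount N
    if PySem.List.pyGetD amount cd.1 0 = 0 ∧ PySem.List.pyGetD amount cd.2 0 = 0 then []
    else
      let m := min (-(PySem.List.pyGetD amount cd.2 0)) (PySem.List.pyGetD amount cd.1 0)
      let amount1 := PySem.List.pySetD amount cd.1 (PySem.List.pyGetD amount cd.1 0 - m)
      let amount2 := PySem.List.pySetD amount1 cd.2 (PySem.List.pyGetD amount1 cd.2 0 + m)
      (cd.2, cd.1, m) :: pvLoopB fuel amount2 N

def minCashFlow_alt (graph : List (List Int)) : List (List Int) :=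
  let N : Int := graph.length
  let amount := (PySem.List.pyRange 0 N 1).map (fun p =>
    (graph.map (fun row => PySem.List.pyGetD row p 0)).sum -
    (PySem.List.slice (PySem.List.pyGetD graph p []) none (some N)).sum)
  let transfers := pvLoopB (N.toNat + 1) amount N
  let final0 := (PySem.List.pyRange 0 N 1).map (fun _ => List.replicate N.toNat (0 : Int))
  transfers.foldl (fun fg t =>
    PySem.List.pySetD fg t.1
      (PySem.List.pySetD (PySem.List.pyGetD fg t.1 []) t.2.1 t.2.2)) final0

-- ===== PRECONDITION & SPEC =====
-- Pre_ excludes exactly the inputs on which A raises: the empty graph (IndexError on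
-- amount[0]) and graphs with a row shorter than len(graph) (IndexError while building
-- amount); on every other input A returns normally.
def Pre_minCashFlow (graph : List (List Int)) : Prop :=
  graph ≠ [] ∧ ∀ row ∈ graph, graph.length ≤ row.length
instance (graph : List (List Int)) : Decidable (Pre_minCashFlow graph) := by
  unfold Pre_minCashFlow; infer_instance

def pvWitness_minCashFlow : List (List Int) := [[0, 3], [1, 0]]

def Spec_minCashFlow (graph : List (List Int)) (out : List (List Int)) : Prop := out = minCashFlow_alt graph
instance (graph : List (List Int)) (out : List (List Int)) : Decidable (Spec_minCashFlow graph out) := by unfold Spec_minCashFlow; infer_instance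

-- ===== CLAIM (what is proved, stated in full; the proofs are below) =====
def Claim_equal_minCashFlow : Prop := ∀ (graph : List (List Int)), Dom_minCashFlow graph → Pre_minCashFlow graph → Spec_minCashFlow graph (minCashFlow graph)

-- ===== LEMMAS AND PROOFS =====

theorem pvMinOf2_eq_min (x y : Int) : pvMinOf2 x y = min x y := by
  unfold pvMinOf2; rw [min_def]; split_ifs <;> omega

-- a fold that updates a pair componentwise is the pair of componentwise folds
theorem foldl_pair {α : Type} (f g : Int → α → Int) (l : List α) :
    ∀ (c d : Int),
      l.foldl (fun cd i => (f cd.1 i, g cd.2 i)) (c, d) =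
        (l.foldl f c, l.foldl g d) := by
  induction l with
  | nil => intro c d; rfl
  | cons x xs ih => intro c d; simpa [List.foldl] using ih (f c x) (g d x)

theorem scanB_eq (amount : List Int) (N : Int) :
    pvScanB amount N = (pvGetMax amount N, pvGetMin amount N) := by
  simp only [pvScanB, pvGetMax, pvGetMin]
  exact foldl_pair
    (fun c i => if PySem.List.pyGetD amount i 0 > PySem.List.pyGetD amount c 0 then i else c)
    (fun d i => if PySem.List.pyGetD amount i 0 < PySem.List.pyGetD amount d 0 then i else d)
    (PySem.List.pyRange 1 N 1) 0 0

theorem recA_eq_foldl_loopB (fuel : Nat) :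
    ∀ (amount : List Int) (N : Int) (fg : List (List Int)),
    pvRecA fuel amount N fg =
      (pvLoopB fuel amount N).foldl (fun fg t =>
        PySem.List.pySetD fg t.1
          (PySem.List.pySetD (PySem.List.pyGetD fg t.1 []) t.2.1 t.2.2)) fg := by
  induction fuel with
  | zero => intro amount N fg; rfl
  | succ fuel ih =>
    intro amount N fg
    rw [pvRecA, pvLoopB, scanB_eq]
    by_cases h : PySem.List.pyGetD amount (pvGetMax amount N) 0 = 0 ∧
        PySem.List.pyGetD amount (pvGetMin amount N) 0 = 0
    · rw [if_pos h, if_pos h]; rfl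
    · rw [if_neg h, if_neg h]
      simp only [List.foldl_cons, pvMinOf2_eq_min]
      exact ih _ N _

-- folding index-wise point updates over pyRange m N, described elementwise
theorem fold_set_range (F : List Int → Int → List Int) (S : Int → Int)
    (hF : ∀ (a : List Int) (p : Int), 0 ≤ p → p.toNat < a.length →
      F a p = a.set p.toNat (a.getD p.toNat 0 + S p)) (N : Int) :
    ∀ (k : Nat) (m : Int) (amt : List Int), 0 ≤ m → (N - m).toNat = k →
      ((N : Int) ≤ amt.length) →
      (PySem.List.pyRange m N 1).foldl F amt =
        amt.mapIdx (fun q x => if m ≤ (q : Int) ∧ (q : Int) < N then x + S q else x) := by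
  intro k
  induction k with
  | zero =>
    intro m amt hm hk hlen
    rw [PySem.List.pyRange_one_eq_nil (by omega)]
    simp only [List.foldl_nil]
    refine (List.ext_getElem (by simp) ?_).symm
    intro q h1 h2
    simp only [List.getElem_mapIdx]
    rw [if_neg (by omega)]
  | succ k ih =>
    intro m amt hm hk hlen
    rw [PySem.List.pyRange_one_cons (by omega), List.foldl_cons]
    have hmlt : m.toNat < amt.length := by omega
    rw [hF amt m hm hmlt]
    rw [ih (m + 1) _ (by omega) (by omega) (by simpa using hlen)]
    refine List.ext_getElem (by simp) ?_
    intro q h1 h2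
    simp only [List.getElem_mapIdx, List.getElem_set]
    have hq : q < amt.length := by simpa using h2
    by_cases hqm : m.toNat = q
    · rw [if_pos hqm, if_neg (by omega), if_pos (by omega),
        List.getD_eq_getElem _ _ hmlt]
      have hmq : m = (q : Int) := by omega
      have hg : amt[m.toNat] = amt[q]'hq := by simp [hqm]
      rw [hg]
      exact congrArg (fun z => amt[q]'hq + S z) hmq
    · rw [if_neg hqm]
      by_cases hcase : m + 1 ≤ (q : Int) ∧ (q : Int) < N
      · rw [if_pos hcase, if_pos (by omega)]
      · rw [if_neg hcase, if_neg (by omega)]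

-- the inner Python loop 'for i: amount[p] += f(i)' adds the whole sum at position p
theorem inner_fold (f : Int → Int) (l : List Int) :
    ∀ (a : List Int) (p : Int), 0 ≤ p → p.toNat < a.length →
      l.foldl (fun a i => PySem.List.pySetD a p (PySem.List.pyGetD a p 0 + f i)) a =
        a.set p.toNat (a.getD p.toNat 0 + (l.map f).sum) := by
  induction l with
  | nil =>
    intro a p hp hlt
    simp only [List.foldl_nil, List.map_nil, List.sum_nil, add_zero]
    rw [List.getD_eq_getElem _ _ hlt, List.set_getElem_self hlt]
  | cons x xs ih =>
    intro a p hp hlt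
    simp only [List.foldl_cons, List.map_cons, List.sum_cons]
    rw [PySem.List.pySetD_of_nonneg _ _ hp,
      PySem.List.pyGetD_eq_getElem _ _ hp (by omega)]
    rw [ih _ p hp (by simpa using hlt)]
    rw [List.getD_eq_getElem _ _ (by simpa using hlt), List.getElem_set_self,
      List.set_set, List.getD_eq_getElem _ _ hlt]
    ring_nf

theorem sum_map_sub {α : Type} (f g : α → Int) (l : List α) :
    (l.map (fun x => f x - g x)).sum = (l.map f).sum - (l.map g).sum := by
  induction l with
  | nil => simp
  | cons x xs ih => simp [ih]; ring

-- reading the first N entries of a row of length ≥ N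
theorem map_pyGetD_range_take (row : List Int) (N : Int) (_h0 : 0 ≤ N)
    (hle : N ≤ row.length) :
    (PySem.List.pyRange 0 N 1).map (fun i => PySem.List.pyGetD row i 0) =
      row.take N.toNat := by
  refine List.ext_getElem (by simp [PySem.List.length_pyRange_one]; omega) ?_
  intro q h1 h2
  have hq : q < N.toNat := by simpa [PySem.List.length_pyRange_one] using h1
  simp only [List.getElem_map, PySem.List.getElem_pyRange_one, List.getElem_take]
  rw [PySem.List.pyGetD_eq_getElem _ _ (by omega) (by omega)]
  congr 1
  omega

theorem amount_eq (graph : List (List Int))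
    (hlen : ∀ row ∈ graph, graph.length ≤ row.length) :
    ((PySem.List.pyRange 0 (graph.length : Int) 1).foldl (fun amt p =>
      (PySem.List.pyRange 0 (graph.length : Int) 1).foldl (fun amt i =>
        PySem.List.pySetD amt p (PySem.List.pyGetD amt p 0 +
          (PySem.List.pyGetD (PySem.List.pyGetD graph i []) p 0 -
           PySem.List.pyGetD (PySem.List.pyGetD graph p []) i 0))) amt)
      ((PySem.List.pyRange 0 (graph.length : Int) 1).map (fun _ => (0 : Int)))) =
    (PySem.List.pyRange 0 (graph.length : Int) 1).map (fun p =>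
      (graph.map (fun row => PySem.List.pyGetD row p 0)).sum -
      (PySem.List.slice (PySem.List.pyGetD graph p []) none (some (graph.length : Int))).sum) := by
  set N : Int := (graph.length : Int) with hN
  set S : Int → Int := fun p =>
    ((PySem.List.pyRange 0 N 1).map (fun i =>
      PySem.List.pyGetD (PySem.List.pyGetD graph i []) p 0 -
      PySem.List.pyGetD (PySem.List.pyGetD graph p []) i 0)).sum with hS
  have hzl : ((PySem.List.pyRange 0 N 1).map (fun _ => (0 : Int))).length = N.toNat := by
    simp [PySem.List.length_pyRange_one]
  rw [fold_set_range _ S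
    (by
      intro a p hp hlt
      exact inner_fold _ _ a p hp hlt)
    N (N - 0).toNat 0 _ le_rfl rfl (by omega)]
  refine List.ext_getElem (by simp) ?_
  intro q h1 h2
  have hqN : q < N.toNat := by simpa [hzl] using h1
  simp only [List.getElem_mapIdx, List.getElem_map, PySem.List.getElem_pyRange_one]
  rw [if_pos (by constructor <;> omega)]
  have hz : ((PySem.List.pyRange 0 N 1).map (fun _ => (0 : Int)))[q]'(by simp [PySem.List.length_pyRange_one]; omega) = 0 := by
    simp
  simp only [zero_add, hS]
  rw [sum_map_sub, hN]
  have hrowq : PySem.List.pyGetD graph ((q : Nat) : Int) [] = graph[q]'(by omega) := by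
    rw [PySem.List.pyGetD_eq_getElem _ _ (by omega) (by omega)]
    simp
  congr 1
  · -- column sums
    have hcomp : (fun i => PySem.List.pyGetD (PySem.List.pyGetD graph i []) ((q : Nat) : Int) 0) =
        (fun row => PySem.List.pyGetD row ((q : Nat) : Int) 0) ∘
          (fun i => PySem.List.pyGetD graph i []) := rfl
    rw [hcomp, ← List.map_map, PySem.List.map_pyGetD_pyRange_zero']
  · -- row sum of the first N entries
    rw [hrowq, PySem.List.slice_to _ (by omega),
      ← map_pyGetD_range_take (graph[q]'(by omega)) (graph.length : Int) (by omega)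
        (by exact_mod_cast hlen _ (List.getElem_mem _))]

-- the two initial zero matrices coincide
theorem final0_eq (N : Int) :
    (PySem.List.pyRange 0 N 1).map (fun _ =>
      (PySem.List.pyRange 0 N 1).map (fun _ => (0 : Int))) =
    (PySem.List.pyRange 0 N 1).map (fun _ => List.replicate N.toNat (0 : Int)) := by
  refine List.map_congr_left ?_
  intro _ _
  refine List.ext_getElem (by simp [PySem.List.length_pyRange_one]) ?_
  intro q h1 h2
  simp

-- ===== VERDICT (by name: the statement is the Claim_ definition above) =====
theorem minCashFlow_spec : Claim_equal_minCashFlow := by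
  intro graph _ hpre
  unfold Spec_minCashFlow minCashFlow minCashFlow_alt
  dsimp only
  rw [recA_eq_foldl_loopB, amount_eq graph hpre.2, final0_eq]
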